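-- pv_equiv track=rewrite | github.com/coolzoa/INTRO_kenken | kenken/kenken.py | operador
-- ===== SOURCE A (Python) =====
-- def operador(string):
--     resul=""
--     for i in string:
--         if i=="+":
--             resul="+"
--         elif i=="/":
--             resul="/"
--         elif i=="x":
--             resul="x"
--         elif i=="-":
--             resul="-"
--     return resul
-- ===== SOURCE B (Python) =====
-- def operador(string):
--     for c in reversed(string):
--         if c in "+/x-":
--             return c
--     return ""
-- ===== Notes on version B (the rewrite author's own statement) =====
-- stated objective: faster
-- what changed: B scans the string backwards and returns the first operator it meets (early exit), instead of A's forward pass that keeps overwriting an accumulator over the whole string.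
import Mathlib
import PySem

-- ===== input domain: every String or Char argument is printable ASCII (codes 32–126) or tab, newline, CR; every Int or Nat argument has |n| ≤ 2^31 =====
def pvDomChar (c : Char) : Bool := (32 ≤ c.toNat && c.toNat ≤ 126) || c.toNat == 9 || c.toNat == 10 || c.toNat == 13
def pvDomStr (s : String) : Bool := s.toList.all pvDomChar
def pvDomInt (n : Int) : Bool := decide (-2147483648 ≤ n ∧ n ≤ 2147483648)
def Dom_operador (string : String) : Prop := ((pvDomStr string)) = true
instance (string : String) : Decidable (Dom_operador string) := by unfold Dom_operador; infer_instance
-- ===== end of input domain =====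

-- B scans backwards and returns the first operator met (early exit); A scans forwards overwriting an accumulator.

-- ===== PORT A =====
-- forward pass: branch chain overwriting the accumulator, as in the Python
def operador (string : String) : String :=
  string.toList.foldl
    (fun resul i =>
      if i = '+' then "+"
      else if i = '/' then "/"
      else if i = 'x' then "x"
      else if i = '-' then "-"
      else resul)
    ""

-- ===== PORT B =====
-- reverse scan with early return
def operadorAltGo : List Char → String
  | [] => ""
  | c :: rest => if ("+/x-" : String).toList.contains c then String.ofList [c] else operadorAltGo rest

def operador_alt (string : String) : String :=
  operadorAltGo string.toList.reverse

-- ===== PRECONDITION & SPEC =====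
def Spec_operador (string : String) (out : String) : Prop := out = operador_alt string
instance (string : String) (out : String) : Decidable (Spec_operador string out) := by unfold Spec_operador; infer_instance

-- ===== CLAIM (what is proved, stated in full; the proofs are below) =====
def Claim_equal_operador : Prop := ∀ (string : String), Dom_operador string → Spec_operador string (operador string)

-- ===== LEMMAS AND PROOFS =====
def pvStep (resul : String) (i : Char) : String :=
  if i = '+' then "+"
  else if i = '/' then "/"
  else if i = 'x' then "x"
  else if i = '-' then "-"
  else resul

lemma pvFold_eq_go (l : List Char) (r : String) :
    l.foldl pvStep r = (if operadorAltGo l.reverse = "" then r else operadorAltGo l.reverse) := by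
  induction l using List.reverseRecOn generalizing r with
  | nil => simp [operadorAltGo]
  | append_singleton ys c ih =>
    rw [List.foldl_append, List.foldl_cons, List.foldl_nil, ih]
    simp only [List.reverse_append, List.reverse_singleton, List.singleton_append, operadorAltGo]
    by_cases h1 : c = '+'
    · subst h1; simp [pvStep, show String.ofList ['+'] = "+" from rfl]
    · by_cases h2 : c = '/'
      · subst h2; simp [pvStep, h1, show String.ofList ['/'] = "/" from rfl]
      · by_cases h3 : c = 'x'
        · subst h3; simp [pvStep, h1, h2, show String.ofList ['x'] = "x" from rfl]
        · by_cases h4 : c = '-'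
          · subst h4; simp [pvStep, h1, h2, h3, show String.ofList ['-'] = "-" from rfl]
          · simp [pvStep, h1, h2, h3, h4]

theorem operador_spec : Claim_equal_operador := by
  intro s _
  unfold Spec_operador operador operador_alt
  rw [show (fun resul i => if i = '+' then "+" else if i = '/' then "/" else if i = 'x' then "x" else if i = '-' then "-" else resul) = pvStep from rfl]
  rw [pvFold_eq_go]
  split <;> simp_all
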